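-- pv_equiv track=rewrite | github.com/BardiaYaghmaie/k8s-access-monitor | src/main.py | _extract_permissions_from_role
-- ===== SOURCE A (Python) =====
-- from typing import Dict, List, Any, Optional
--
-- def _extract_permissions_from_role(role_data: Dict) -> Dict[str, List[str]]:
--     """Extract permissions from a role definition"""
--     permissions = {}
--
--     if 'rules' in role_data:
--         for rule in role_data['rules']:
--             verbs = rule.get('verbs', [])
--             resources = rule.get('resources', [])
--             api_groups = rule.get('api_groups', [''])
--
--             for resource in resources:
--                 if resource not in permissions:
--                     permissions[resource] = []
--                 for verb in verbs:
--                     if verb not in permissions[resource]: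
--                         permissions[resource].append(verb)
--
--     return permissions
-- ===== SOURCE B (Python) =====
-- def _extract_permissions_from_role(role_data):
--     """Extract permissions from a role definition, resource-major: compute the
--     first-seen resource order, then for each resource scan all rules for its verbs."""
--     rules = role_data.get('rules', [])
--     order = list(dict.fromkeys(res for rule in rules
--                                for res in rule.get('resources', [])))
--
--     def verbs_for(res):
--         seen = {}
--         for rule in rules:
--             if res in rule.get('resources', []):
--                 for v in rule.get('verbs', []):
--                     seen[v] = None
--         return list(seen)
--
--     return {res: verbs_for(res) for res in order}
-- ===== Notes on version B (the rewrite author's own statement) =====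
-- stated objective: alternative
-- what changed: A builds the result rule-major with an inline per-verb membership dedup while inserting into the dict; B is resource-major: it first computes the first-seen order of resources, then for each resource scans all rules collecting its verbs into an ordered set.
import Mathlib
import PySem

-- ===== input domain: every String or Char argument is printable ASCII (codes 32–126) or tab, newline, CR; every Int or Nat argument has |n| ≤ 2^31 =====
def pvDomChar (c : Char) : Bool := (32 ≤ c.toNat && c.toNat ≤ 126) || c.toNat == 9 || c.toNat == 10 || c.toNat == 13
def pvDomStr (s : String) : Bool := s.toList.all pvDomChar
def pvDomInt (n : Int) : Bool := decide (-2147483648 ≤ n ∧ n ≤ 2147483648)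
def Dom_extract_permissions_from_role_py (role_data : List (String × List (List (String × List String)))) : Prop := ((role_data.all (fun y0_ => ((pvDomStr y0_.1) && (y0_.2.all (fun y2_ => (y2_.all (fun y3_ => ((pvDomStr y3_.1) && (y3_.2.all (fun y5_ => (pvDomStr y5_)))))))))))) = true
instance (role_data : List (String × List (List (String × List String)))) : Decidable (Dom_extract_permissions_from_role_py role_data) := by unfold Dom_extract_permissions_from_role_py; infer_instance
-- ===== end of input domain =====

-- B is resource-major instead of A's rule-major insertion loop: it first computes the first-seen
-- order of resources, then gathers each resource's verbs by scanning all rules; same return value.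

-- ===== PORT A =====
def extract_permissions_from_role_py (role_data : List (String × List (List (String × List String)))) : List (String × List String) :=
  let permissions : PySem.Dict String (List String) := PySem.Dict.empty
  let permissions :=
    match role_data.lookup "rules" with
    | none => permissions
    | some rules =>
      rules.foldl (fun (permissions : PySem.Dict String (List String)) (rule : List (String × List String)) =>
        let verbs := (rule.lookup "verbs").getD []
        let resources := (rule.lookup "resources").getD []
        let _api_groups := (rule.lookup "api_groups").getD [""]
        resources.foldl (fun permissions resource =>
          let permissions :=
            if permissions.contains resource then permissions
            else permissions.insert resource []
          verbs.foldl (fun permissions verb =>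
            if verb ∈ permissions.getD resource [] then permissions
            else permissions.insert resource (permissions.getD resource [] ++ [verb]))
            permissions) permissions) permissions
  permissions.items

-- ===== PORT B =====
-- verbs_for: for one resource, scan every rule; when the resource is mentioned, add its verbs
-- (Python's 'seen' dict used as an ordered set = PySem.Set).
def pv_verbs_for (rules : List (List (String × List String))) (res : String) : List String :=
  rules.foldl (fun (seen : PySem.Set String) rule =>
    if res ∈ (rule.lookup "resources").getD [] then
      ((rule.lookup "verbs").getD []).foldl PySem.Set.add seen
    else seen) PySem.Set.empty

def extract_permissions_from_role_py_alt (role_data : List (String × List (List (String × List String)))) : List (String × List String) :=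
  let rules := (role_data.lookup "rules").getD []
  let order := PySem.List.dedup (rules.flatMap (fun rule => (rule.lookup "resources").getD []))
  order.map (fun res => (res, pv_verbs_for rules res))

-- ===== PRECONDITION & SPEC =====
def Spec_extract_permissions_from_role_py (role_data : List (String × List (List (String × List String)))) (out : List (String × List String)) : Prop := out = extract_permissions_from_role_py_alt role_data
instance (role_data : List (String × List (List (String × List String)))) (out : List (String × List String)) : Decidable (Spec_extract_permissions_from_role_py role_data out) := by unfold Spec_extract_permissions_from_role_py; infer_instance

-- ===== CLAIM (what is proved, stated in full; the proofs are below) =====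
def Claim_equal_extract_permissions_from_role_py : Prop := ∀ (role_data : List (String × List (List (String × List String)))), Dom_extract_permissions_from_role_py role_data → Spec_extract_permissions_from_role_py role_data (extract_permissions_from_role_py role_data)

-- ===== LEMMAS AND PROOFS =====

-- intermediate characterization of A's dict: accumulate ALL verbs per resource occurrence
def pvAcc (rules : List (List (String × List String))) : PySem.Dict String (List String) :=
  rules.foldl (fun permissions rule =>
    let verbs := (rule.lookup "verbs").getD []
    ((rule.lookup "resources").getD []).foldl
      (fun (permissions : PySem.Dict String (List String)) resource => permissions.modify resource [] (· ++ verbs))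
      permissions) PySem.Dict.empty

-- the value-wise dedup image of a dict
def pvMapDedup (d : PySem.Dict String (List String)) : PySem.Dict String (List String) :=
  PySem.Dict.mk (d.items.map (fun p => (p.1, PySem.List.dedup p.2)))

theorem get?_pvMapDedup (d : PySem.Dict String (List String)) (r : String) :
    (pvMapDedup d).get? r = (d.get? r).map PySem.List.dedup := by
  simp [pvMapDedup, PySem.Dict.get?, List.find?_map, Option.map_map, Function.comp_def]

theorem contains_pvMapDedup (d : PySem.Dict String (List String)) (r : String) :
    (pvMapDedup d).contains r = d.contains r := by
  simp [pvMapDedup, PySem.Dict.contains, List.any_map, Function.comp_def]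

theorem keys_pvMapDedup (d : PySem.Dict String (List String)) :
    (pvMapDedup d).keys = d.keys := by
  simp [pvMapDedup, PySem.Dict.keys, List.map_map, Function.comp]

theorem getD_pvMapDedup (d : PySem.Dict String (List String)) (r : String) :
    (pvMapDedup d).getD r [] = PySem.List.dedup (d.getD r []) := by
  simp [PySem.Dict.getD, get?_pvMapDedup]
  cases d.get? r <;> simp [PySem.List.dedup, PySem.Set.ofList, PySem.Set.empty]

theorem pvMapDedup_insert (d : PySem.Dict String (List String)) (r : String) (w : List String) :
    pvMapDedup (d.insert r w) = (pvMapDedup d).insert r (PySem.List.dedup w) := by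
  apply PySem.Dict.ext
  by_cases h : d.contains r = true
  · have hc : (pvMapDedup d).contains r = true := by rw [contains_pvMapDedup]; exact h
    simp only [pvMapDedup] at hc ⊢
    rw [PySem.Dict.items_insert_of_contains _ _ h, PySem.Dict.items_insert_of_contains _ _ hc]
    simp only [List.map_map]
    apply List.map_congr_left
    intro p _
    by_cases h2 : p.1 = r <;> simp [h2]
  · have hb : d.contains r = false := by simpa using h
    have hc : (pvMapDedup d).contains r = false := by rw [contains_pvMapDedup]; exact hb
    simp only [pvMapDedup] at hc ⊢
    rw [PySem.Dict.items_insert_of_not_contains _ _ hb, PySem.Dict.items_insert_of_not_contains _ _ hc]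
    simp

theorem insert_getD_self (d : PySem.Dict String (List String)) (r : String)
    (hc : d.contains r = true) (hnd : d.keys.Nodup) :
    d.insert r (d.getD r []) = d := by
  apply PySem.Dict.ext
  rw [PySem.Dict.items_insert_of_contains _ _ hc]
  have : ∀ p ∈ d.items, (if (p.1 == r) = true then (r, d.getD r []) else p) = p := by
    intro p hp
    by_cases h2 : p.1 = r
    · obtain ⟨k, v⟩ := p
      simp only at h2
      subst h2
      simp [PySem.Dict.getD_of_mem_items d hp hnd []]
    · simp [h2]
  rw [List.map_congr_left this]; simp

theorem dedup_append (xs vs : List String) :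
    PySem.List.dedup (xs ++ vs) = vs.foldl PySem.Set.add (PySem.List.dedup xs) := by
  simp [PySem.List.dedup, PySem.Set.ofList, List.foldl_append]

theorem foldVerbs (vs : List String) (e : PySem.Dict String (List String)) (r : String)
    (hc : e.contains r = true) (hnd : e.keys.Nodup) :
    vs.foldl (fun permissions verb =>
        if verb ∈ permissions.getD r [] then permissions
        else permissions.insert r (permissions.getD r [] ++ [verb])) e
      = e.insert r (vs.foldl PySem.Set.add (e.getD r [])) := by
  induction vs generalizing e with
  | nil => simp [insert_getD_self e r hc hnd]
  | cons v vs ih =>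
    simp only [List.foldl_cons]
    by_cases hm : v ∈ e.getD r []
    · rw [if_pos hm, ih e hc hnd]
      congr 1
      simp [PySem.Set.add, hm]
    · rw [if_neg hm]
      have hc' : (e.insert r (e.getD r [] ++ [v])).contains r = true :=
        PySem.Dict.contains_insert_self _ _ _
      have hnd' : (e.insert r (e.getD r [] ++ [v])).keys.Nodup :=
        PySem.Dict.nodup_keys_insert _ _ _ hnd
      rw [ih _ hc' hnd', PySem.Dict.getD_insert_self, PySem.Dict.insert_insert_self]
      congr 1
      simp [PySem.Set.add, hm]

theorem stepResource (d : PySem.Dict String (List String)) (r : String) (vs : List String)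
    (hnd : d.keys.Nodup) :
    (let e := if (pvMapDedup d).contains r then pvMapDedup d else (pvMapDedup d).insert r [];
     vs.foldl (fun permissions verb =>
        if verb ∈ permissions.getD r [] then permissions
        else permissions.insert r (permissions.getD r [] ++ [verb])) e)
      = pvMapDedup (d.modify r [] (· ++ vs)) := by
  simp only [PySem.Dict.modify, pvMapDedup_insert, contains_pvMapDedup]
  cases h : d.contains r
  · simp only [Bool.false_eq_true, if_false]
    have hc' : ((pvMapDedup d).insert r []).contains r = true :=
      PySem.Dict.contains_insert_self _ _ _
    have hnd' : ((pvMapDedup d).insert r []).keys.Nodup :=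
      PySem.Dict.nodup_keys_insert _ _ _ (by rw [keys_pvMapDedup]; exact hnd)
    rw [foldVerbs vs _ r hc' hnd', PySem.Dict.getD_insert_self, PySem.Dict.insert_insert_self,
      PySem.Dict.getD_of_not_contains _ _ h]
    simp [PySem.List.dedup, PySem.Set.ofList, PySem.Set.empty]
  · simp only [if_true]
    rw [foldVerbs vs _ r (by rw [contains_pvMapDedup]; exact h)
      (by rw [keys_pvMapDedup]; exact hnd), getD_pvMapDedup, dedup_append]

theorem foldResources (resources : List String) (vs : List String)
    (d : PySem.Dict String (List String)) (hnd : d.keys.Nodup) :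
    resources.foldl (fun permissions resource =>
        let permissions :=
          if permissions.contains resource then permissions
          else permissions.insert resource []
        vs.foldl (fun permissions verb =>
          if verb ∈ permissions.getD resource [] then permissions
          else permissions.insert resource (permissions.getD resource [] ++ [verb]))
          permissions) (pvMapDedup d)
      = pvMapDedup (resources.foldl
          (fun permissions resource => permissions.modify resource [] (· ++ vs)) d) := by
  induction resources generalizing d with
  | nil => rfl
  | cons r rs ih =>
    simp only [List.foldl_cons]
    rw [stepResource d r vs hnd]
    exact ih _ (PySem.Dict.nodup_keys_insert _ _ _ hnd)

theorem nodup_keys_pvAcc_step (rules : List (List (String × List String)))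
    (d : PySem.Dict String (List String)) (hnd : d.keys.Nodup) :
    (rules.foldl (fun permissions rule =>
      let verbs := (rule.lookup "verbs").getD []
      ((rule.lookup "resources").getD []).foldl
        (fun (permissions : PySem.Dict String (List String)) resource => permissions.modify resource [] (· ++ verbs))
        permissions) d).keys.Nodup := by
  induction rules generalizing d with
  | nil => exact hnd
  | cons rule rs ih =>
    simp only [List.foldl_cons]
    exact ih _ (PySem.Dict.nodup_keys_foldl_modify_key _ _ _ _ _ hnd)

theorem nodup_keys_pvAcc (rules : List (List (String × List String))) :
    (pvAcc rules).keys.Nodup :=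
  nodup_keys_pvAcc_step rules PySem.Dict.empty (by simp [PySem.Dict.keys, PySem.Dict.empty])

-- A's fold equals the value-wise dedup of the accumulation dict
theorem A_eq_dedup_acc (rules : List (List (String × List String)))
    (d : PySem.Dict String (List String)) (hnd : d.keys.Nodup) :
    rules.foldl (fun permissions rule =>
        let verbs := (rule.lookup "verbs").getD []
        let resources := (rule.lookup "resources").getD []
        let _api_groups := (rule.lookup "api_groups").getD [""]
        resources.foldl (fun permissions resource =>
          let permissions :=
            if permissions.contains resource then permissions
            else permissions.insert resource []
          verbs.foldl (fun permissions verb =>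
            if verb ∈ permissions.getD resource [] then permissions
            else permissions.insert resource (permissions.getD resource [] ++ [verb]))
            permissions) permissions) (pvMapDedup d)
      = pvMapDedup (rules.foldl (fun permissions rule =>
          let verbs := (rule.lookup "verbs").getD []
          ((rule.lookup "resources").getD []).foldl
            (fun permissions resource => permissions.modify resource [] (· ++ verbs))
            permissions) d) := by
  induction rules generalizing d with
  | nil => rfl
  | cons rule rs ih =>
    simp only [List.foldl_cons]
    rw [foldResources _ _ d hnd]
    exact ih _ (PySem.Dict.nodup_keys_foldl_modify_key _ _ _ _ _ hnd)

theorem pvMapDedup_empty : pvMapDedup PySem.Dict.empty = PySem.Dict.empty := rfl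

-- KEYS of the accumulation dict are the first-seen resource order
theorem keys_pvAcc_step (rules : List (List (String × List String)))
    (d : PySem.Dict String (List String)) :
    (rules.foldl (fun permissions rule =>
      let verbs := (rule.lookup "verbs").getD []
      ((rule.lookup "resources").getD []).foldl
        (fun (permissions : PySem.Dict String (List String)) resource => permissions.modify resource [] (· ++ verbs))
        permissions) d).keys
      = (rules.flatMap (fun rule => (rule.lookup "resources").getD [])).foldl PySem.Set.add d.keys := by
  induction rules generalizing d with
  | nil => rfl
  | cons rule rs ih =>
    simp only [List.foldl_cons, List.flatMap_cons, List.foldl_append]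
    rw [ih]
    congr 1
    have := PySem.Dict.keys_foldl_modify (l := (rule.lookup "resources").getD [])
      (d0 := ([] : List String)) (f := fun _ _ => (· ++ (rule.lookup "verbs").getD [])) (d := d)
    simpa [PySem.Set.update] using this

theorem keys_pvAcc (rules : List (List (String × List String))) :
    (pvAcc rules).keys = PySem.List.dedup (rules.flatMap (fun rule => (rule.lookup "resources").getD [])) := by
  rw [pvAcc, keys_pvAcc_step]
  simp [PySem.List.dedup, PySem.Set.ofList_eq_foldl, PySem.Dict.keys, PySem.Dict.empty]

-- folding Set.add twice with the same list is folding once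
theorem foldl_add_absorb (vs : List String) (s : PySem.Set String)
    (h : ∀ v ∈ vs, v ∈ s) : vs.foldl PySem.Set.add s = s := by
  induction vs with
  | nil => rfl
  | cons v vt ih =>
    simp only [List.foldl_cons]
    rw [PySem.Set.add_of_mem (h v (by simp))]
    exact ih (fun w hw => h w (by simp [hw]))

theorem mem_foldl_add_of_mem (vs : List String) (s : PySem.Set String) (v : String)
    (h : v ∈ s) : v ∈ vs.foldl PySem.Set.add s := by
  induction vs generalizing s with
  | nil => exact h
  | cons u vt ih => exact ih _ (by rw [PySem.Set.mem_add]; exact Or.inl h)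

theorem mem_foldl_add_of_mem_list (vs : List String) (v : String) (h : v ∈ vs) :
    ∀ s : PySem.Set String, v ∈ vs.foldl PySem.Set.add s := by
  induction vs with
  | nil => cases h
  | cons u vt ih =>
    intro s
    simp only [List.foldl_cons]
    rcases List.mem_cons.mp h with rfl | h'
    · exact mem_foldl_add_of_mem _ _ _ (by rw [PySem.Set.mem_add]; exact Or.inr rfl)
    · exact ih h' _

theorem foldl_add_idem (vs : List String) (s : PySem.Set String) :
    vs.foldl PySem.Set.add (vs.foldl PySem.Set.add s) = vs.foldl PySem.Set.add s :=
  foldl_add_absorb vs _ (fun v hv => mem_foldl_add_of_mem_list vs v hv s)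

-- inner: dedup of getD after one rule's resource loop
theorem dedup_getD_foldResources (rs : List String) (vs : List String) (r : String)
    (d : PySem.Dict String (List String)) :
    PySem.List.dedup ((rs.foldl (fun (d : PySem.Dict String (List String)) x => d.modify x [] (· ++ vs)) d).getD r [])
      = if r ∈ rs then vs.foldl PySem.Set.add (PySem.List.dedup (d.getD r [])) else PySem.List.dedup (d.getD r []) := by
  induction rs generalizing d with
  | nil => simp
  | cons a rs ih =>
    simp only [List.foldl_cons]
    rw [ih]
    by_cases har : r = a
    · subst har
      rw [PySem.Dict.getD_modify_self, dedup_append]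
      by_cases hmem : r ∈ rs <;> simp [hmem, foldl_add_idem]
    · rw [PySem.Dict.getD_modify_of_ne d [] _ har]
      simp [List.mem_cons, har]

-- dedup of getD of the accumulation dict = B's per-resource scan
theorem dedup_getD_pvAcc_step (rules : List (List (String × List String)))
    (d : PySem.Dict String (List String)) (r : String) :
    PySem.List.dedup ((rules.foldl (fun permissions rule =>
        let verbs := (rule.lookup "verbs").getD []
        ((rule.lookup "resources").getD []).foldl
          (fun (permissions : PySem.Dict String (List String)) resource => permissions.modify resource [] (· ++ verbs))
          permissions) d).getD r [])
      = rules.foldl (fun (seen : PySem.Set String) rule =>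
          if r ∈ (rule.lookup "resources").getD [] then
            ((rule.lookup "verbs").getD []).foldl PySem.Set.add seen
          else seen) (PySem.List.dedup (d.getD r [])) := by
  induction rules generalizing d with
  | nil => rfl
  | cons rule rs ih =>
    simp only [List.foldl_cons]
    rw [ih, dedup_getD_foldResources]

theorem dedup_getD_pvAcc (rules : List (List (String × List String))) (r : String) :
    PySem.List.dedup ((pvAcc rules).getD r []) = pv_verbs_for rules r := by
  rw [pvAcc, dedup_getD_pvAcc_step]
  simp [pv_verbs_for, PySem.List.dedup, PySem.Set.ofList, PySem.Dict.getD_empty, PySem.Set.empty]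

-- ===== VERDICT (by name: the statement is the Claim_ definition above) =====
theorem extract_permissions_from_role_py_spec : Claim_equal_extract_permissions_from_role_py := by
  intro role_data _
  unfold Spec_extract_permissions_from_role_py
  unfold extract_permissions_from_role_py extract_permissions_from_role_py_alt
  cases h : role_data.lookup "rules" with
  | none => simp [PySem.Dict.empty]
  | some rules =>
    simp only [Option.getD_some]
    rw [← pvMapDedup_empty,
      A_eq_dedup_acc rules PySem.Dict.empty (by simp [PySem.Dict.keys, PySem.Dict.empty])]
    show (pvMapDedup (pvAcc rules)).items = _
    rw [pvMapDedup, PySem.Dict.items,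
      PySem.Dict.items_eq_map_keys (pvAcc rules) (nodup_keys_pvAcc rules) ([] : List String),
      List.map_map, ← keys_pvAcc rules]
    apply List.map_congr_left
    intro k _
    simp [Function.comp, ← dedup_getD_pvAcc rules k]
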